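-- pv_equiv track=rewrite | github.com/Kayli/algo2024 | python/src/algo2024/a01/miniMaxSum.py | get_unique_indexes
-- ===== SOURCE A (Python) =====
-- def get_unique_indexes(n, l):
--     '''generates n-sized lists of unique indexes of l-sized array'''
--     indices = list(range(l))
--     result = []
--     def generate_unique_indexes_rec(variant: list, left: list):
--         if len(variant) == n:
--             result.append(variant)
--             return
--
--         for i, v in enumerate(left):
--             left_clone = left[:]
--             el = left_clone.pop(i)
--             generate_unique_indexes_rec(variant + [el], left_clone)
--
--     generate_unique_indexes_rec([], indices)
--     return result
-- ===== SOURCE B (Python) =====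
-- def get_unique_indexes(n, l):
--     '''generates n-sized lists of unique indexes of l-sized array'''
--     frontier = [([], list(range(l)))]
--     for _ in range(n):
--         if not frontier:
--             break
--         frontier = [(variant + [x], left[:i] + left[i + 1:])
--                     for variant, left in frontier
--                     for i, x in enumerate(left)]
--     return [variant for variant, _ in frontier if len(variant) == n]
-- ===== Notes on version B (the rewrite author's own statement) =====
-- stated objective: alternative
-- what changed: Replaces the recursive DFS with shared mutable result by an iterative breadth-first level loop: the frontier of (variant, remaining) pairs is expanded n times by one comprehension per level and the final frontier is filtered for length-n variants.
import Mathlib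
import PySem

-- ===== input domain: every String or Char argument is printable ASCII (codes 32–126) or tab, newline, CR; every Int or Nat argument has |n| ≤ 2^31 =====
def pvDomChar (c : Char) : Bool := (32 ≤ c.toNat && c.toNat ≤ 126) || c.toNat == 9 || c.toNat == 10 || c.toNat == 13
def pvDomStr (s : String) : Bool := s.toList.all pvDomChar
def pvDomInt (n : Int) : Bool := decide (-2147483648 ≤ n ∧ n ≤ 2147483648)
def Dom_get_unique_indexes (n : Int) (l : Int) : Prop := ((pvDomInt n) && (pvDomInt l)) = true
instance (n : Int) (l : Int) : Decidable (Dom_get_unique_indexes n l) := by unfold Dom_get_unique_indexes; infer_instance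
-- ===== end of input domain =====

-- B replaces A's recursive DFS (shared mutable result list) by an iterative breadth-first
-- level loop; same output, same cost ("alternative", not claimed faster).


-- ===== PORT A =====
-- A's inner recursive helper appends to the shared `result` in call order, so the port
-- returns the concatenation of the recursive calls' outputs; `for i, v in enumerate(left)`
-- with `left_clone.pop(i)` reads left[i] (getD) and removes it (eraseIdx).
-- (`.attach` only carries the `i ∈ range` fact for termination; the value is unchanged.)
def pvGenRec (n : Int) (variant : List Int) (left : List Int) : List (List Int) :=
  if (variant.length : Int) = n then [variant]
  else
    (List.range left.length).attach.flatMap (fun i =>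
      pvGenRec n (variant ++ [left.getD i.1 0]) (left.eraseIdx i.1))
termination_by left.length
decreasing_by
  have hi : i.1 < left.length := List.mem_range.mp i.2
  simp [List.length_eraseIdx, hi]; omega

def get_unique_indexes (n : Int) (l : Int) : List (List Int) :=
  pvGenRec n [] ((List.range l.toNat).map Int.ofNat)

-- ===== PORT B =====
-- one BFS level: expand every frame (variant, left) by each remaining index
def pvStep (fr : List (List Int × List Int)) : List (List Int × List Int) :=
  fr.flatMap (fun p =>
    (List.range p.2.length).map (fun i => (p.1 ++ [p.2.getD i 0], p.2.eraseIdx i)))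

-- `for _ in range(n): if not frontier: break; frontier = <one level>`
def pvLoop : Nat → List (List Int × List Int) → List (List Int × List Int)
  | 0, fr => fr
  | k + 1, fr => if fr = [] then fr else pvLoop k (pvStep fr)

def get_unique_indexes_alt (n : Int) (l : Int) : List (List Int) :=
  (pvLoop n.toNat [([], (List.range l.toNat).map Int.ofNat)]).filterMap
    (fun p => if (p.1.length : Int) = n then some p.1 else none)

-- ===== PRECONDITION & SPEC =====
def Spec_get_unique_indexes (n : Int) (l : Int) (out : List (List Int)) : Prop := out = get_unique_indexes_alt n l
instance (n : Int) (l : Int) (out : List (List Int)) : Decidable (Spec_get_unique_indexes n l out) := by unfold Spec_get_unique_indexes; infer_instance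

-- ===== CLAIM (what is proved, stated in full; the proofs are below) =====
def Claim_equal_get_unique_indexes : Prop := ∀ (n : Int) (l : Int), Dom_get_unique_indexes n l → Spec_get_unique_indexes n l (get_unique_indexes n l)

-- ===== LEMMAS AND PROOFS =====

-- the DFS value of a whole frontier
def pvG (n : Int) (fr : List (List Int × List Int)) : List (List Int) :=
  fr.flatMap (fun p => pvGenRec n p.1 p.2)

theorem pv_flatMap_attach {α β : Type} (l : List α) (f : α → List β) :
    l.attach.flatMap (fun x => f x.1) = l.flatMap f := by
  rw [← List.flatMap_map, List.attach_map_subtype_val]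

theorem pv_flatMap_flatMap {α β γ : Type} (l : List α) (f : α → List β) (g : β → List γ) :
    (l.flatMap f).flatMap g = l.flatMap (fun a => (f a).flatMap g) := by
  induction l <;> simp [*]

-- one unfolding of A's recursion, in attach-free form
theorem pvGenRec_expand (n : Int) (variant left : List Int)
    (h : ¬ ((variant.length : Int) = n)) :
    pvGenRec n variant left
      = (List.range left.length).flatMap (fun i =>
          pvGenRec n (variant ++ [left.getD i 0]) (left.eraseIdx i)) := by
  rw [pvGenRec, if_neg h]
  exact pv_flatMap_attach (List.range left.length)
    (fun i => pvGenRec n (variant ++ [left.getD i 0]) (left.eraseIdx i))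

-- with a negative target length the DFS never reaches its base case and returns []
theorem pvGenRec_neg (n : Int) (hn : n < 0) :
    ∀ L (left variant : List Int), left.length ≤ L → pvGenRec n variant left = [] := by
  intro L
  induction L with
  | zero =>
    intro left variant h
    have hnil : left = [] := List.eq_nil_of_length_eq_zero (Nat.le_zero.mp h)
    subst hnil
    rw [pvGenRec_expand n variant [] (by omega)]
    simp
  | succ L ih =>
    intro left variant h
    rw [pvGenRec_expand n variant left (by omega)]
    simp only [List.flatMap_eq_nil_iff, List.mem_range]
    intro i hi
    apply ih
    rw [List.length_eraseIdx, if_pos hi]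
    omega

-- expanding one level preserves the DFS value when no frame is at the base case
theorem pvG_step (n : Int) (fr : List (List Int × List Int))
    (h : ∀ p ∈ fr, ¬ ((p.1.length : Int) = n)) : pvG n fr = pvG n (pvStep fr) := by
  unfold pvG pvStep
  rw [pv_flatMap_flatMap]
  apply List.flatMap_congr
  intro p hp
  rw [pvGenRec_expand n p.1 p.2 (h p hp), List.flatMap_map]

-- the BFS loop followed by the length filter computes the DFS value of the frontier,
-- provided all frames are at uniform depth m and m + k = n
theorem pvLoop_filter (n : Int) :
    ∀ (k : Nat) (m : Nat) (fr : List (List Int × List Int)),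
      (∀ p ∈ fr, p.1.length = m) → (m : Int) + (k : Int) = n →
      (pvLoop k fr).filterMap (fun p => if (p.1.length : Int) = n then some p.1 else none)
        = pvG n fr := by
  intro k
  induction k with
  | zero =>
    intro m fr hlen hk
    simp only [pvLoop]
    induction fr with
    | nil => simp [pvG]
    | cons p t iht =>
      have hcond : (p.1.length : Int) = n := by
        have := hlen p (by simp); omega
      simp only [pvG, List.flatMap_cons, List.filterMap_cons, if_pos hcond]
      rw [pvGenRec, if_pos hcond]
      simp only [List.singleton_append]
      exact congrArg (List.cons p.1) (iht (fun q hq => hlen q (by simp [hq])))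
  | succ k ih =>
    intro m fr hlen hk
    by_cases hfr : fr = []
    · subst hfr; simp [pvLoop, pvG]
    · simp only [pvLoop, if_neg hfr]
      have hnot : ∀ p ∈ fr, ¬ ((p.1.length : Int) = n) := by
        intro p hp
        have := hlen p hp
        omega
      rw [ih (m + 1) (pvStep fr) ?_ (by push_cast [Nat.cast_succ] at hk ⊢; omega),
        ← pvG_step n fr hnot]
      intro p hp
      unfold pvStep at hp
      simp only [List.mem_flatMap, List.mem_map, List.mem_range] at hp
      obtain ⟨q, hq, i, hi, rfl⟩ := hp
      simp [hlen q hq]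

-- ===== VERDICT (by name: the statement is the Claim_ definition above) =====
theorem get_unique_indexes_spec : Claim_equal_get_unique_indexes := by
  intro n l _
  unfold Spec_get_unique_indexes get_unique_indexes get_unique_indexes_alt
  by_cases hn : 0 ≤ n
  · rw [pvLoop_filter n n.toNat 0 _ (by simp) (by omega)]
    simp [pvG]
  · have hneg : n < 0 := by omega
    have htn : n.toNat = 0 := by omega
    rw [pvGenRec_neg n hneg _ _ [] (le_refl _), htn]
    simp [pvLoop]
    omega
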